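-- pv_equiv track=rewrite | github.com/a4vichu/py-level | core/routing/router.py | _match_uri
-- ===== SOURCE A (Python) =====
-- def _match_uri(route_uri: str, request_uri: str) -> bool:
--     """Match a route URI against a request URI"""
--     route_parts = route_uri.split('/')
--     request_parts = request_uri.split('/')
--
--     if len(route_parts) != len(request_parts):
--         return False
--
--     for route_part, request_part in zip(route_parts, request_parts):
--         if route_part.startswith('{') and route_part.endswith('}'):
--             continue
--         if route_part != request_part:
--             return False
--
--     return True
-- ===== SOURCE B (Python) =====
-- def _match_uri(route_uri: str, request_uri: str) -> bool:
--     """Single recursive pass: peel one segment off each URI at a time (no full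
--     split, no zip, no separate length check)."""
--     k = route_uri.find('/')
--     r, rrest = (route_uri, None) if k < 0 else (route_uri[:k], route_uri[k + 1:])
--     k = request_uri.find('/')
--     q, qrest = (request_uri, None) if k < 0 else (request_uri[:k], request_uri[k + 1:])
--     ok = (r[:1] == '{' and r[-1:] == '}') or r == q
--     if rrest is None or qrest is None:
--         return ok and rrest is None and qrest is None
--     return ok and _match_uri(rrest, qrest)
-- ===== Notes on version B (the rewrite author's own statement) =====
-- stated objective: alternative
-- what changed: Replaces A's split-both-URIs / length-check / zip-loop with a single recursive pass that peels one segment off each URI at a time (find + slice), checking the segment and recursing on the remainders; length mismatch falls out of the simultaneous recursion.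
import Mathlib
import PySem

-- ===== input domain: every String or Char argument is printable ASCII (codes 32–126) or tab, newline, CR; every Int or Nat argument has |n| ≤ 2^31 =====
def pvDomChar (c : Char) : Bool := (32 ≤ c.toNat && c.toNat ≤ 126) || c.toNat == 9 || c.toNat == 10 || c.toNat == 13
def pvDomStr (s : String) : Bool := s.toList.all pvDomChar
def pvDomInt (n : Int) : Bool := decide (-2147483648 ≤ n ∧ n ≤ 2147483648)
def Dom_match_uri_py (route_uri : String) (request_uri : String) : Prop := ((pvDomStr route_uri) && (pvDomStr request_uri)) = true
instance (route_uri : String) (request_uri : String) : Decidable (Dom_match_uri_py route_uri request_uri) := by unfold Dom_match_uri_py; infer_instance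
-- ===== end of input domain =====

-- B replaces A's split-both-URIs / length-check / zip-loop with one simultaneous segment-peeling recursion (alternative decomposition, same cost).

-- ===== PORT A =====
-- the for-loop over zip(route_parts, request_parts) with continue / early return
def matchLoopA : List (List Char × List Char) → Bool
  | [] => true
  | (r, q) :: rest =>
    if PySem.Chars.startswith r ['{'] && PySem.Chars.endswith r ['}'] then matchLoopA rest
    else if r ≠ q then false else matchLoopA rest

def match_uri_py (route_uri : String) (request_uri : String) : Bool :=
  let route_parts := PySem.Chars.splitOn route_uri.toList ['/']
  let request_parts := PySem.Chars.splitOn request_uri.toList ['/']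
  if route_parts.length ≠ request_parts.length then false
  else matchLoopA (route_parts.zip request_parts)

-- ===== PORT B =====
-- Source B's `s.find('/')` + the two slices: the segment before the first '/' and,
-- if a '/' exists, the remainder after it (exact: first '/' via takeWhile/dropWhile)
def segSplit (s : List Char) : List Char × Option (List Char) :=
  match s.dropWhile (· != '/') with
  | [] => (s.takeWhile (· != '/'), none)
  | _ :: rest => (s.takeWhile (· != '/'), some rest)

-- Source B's `r[:1] == '{' and r[-1:] == '}'` (slices, exact)
def isPh (r : List Char) : Bool := (r.take 1 == ['{']) && (r.drop (r.length - 1) == ['}'])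

-- termination of B's recursion (cited by goB's decreasing_by)
theorem segSplit_some_length {s t : List Char} {a : List Char}
    (h : segSplit s = (a, some t)) : t.length < s.length := by
  unfold segSplit at h
  split at h
  · simp at h
  · rename_i c rest heq
    simp only [Prod.mk.injEq, Option.some.injEq] at h
    obtain ⟨-, rfl⟩ := h
    have hle : (s.dropWhile (· != '/')).length ≤ s.length := s.length_dropWhile_le _
    rw [heq] at hle
    simp only [List.length_cons] at hle
    omega

def goB (rs qs : List Char) : Bool :=
  match hr : segSplit rs, hq : segSplit qs with
  | (r, none), (q, none) => isPh r || r == q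
  | (r, some rs'), (q, some qs') => (isPh r || r == q) && goB rs' qs'
  | _, _ => false
termination_by rs.length
decreasing_by exact segSplit_some_length hr

def match_uri_py_alt (route_uri : String) (request_uri : String) : Bool :=
  goB route_uri.toList request_uri.toList

-- ===== PRECONDITION & SPEC =====
def Spec_match_uri_py (route_uri : String) (request_uri : String) (out : Bool) : Prop := out = match_uri_py_alt route_uri request_uri
instance (route_uri : String) (request_uri : String) (out : Bool) : Decidable (Spec_match_uri_py route_uri request_uri out) := by unfold Spec_match_uri_py; infer_instance

-- ===== CLAIM (what is proved, stated in full; the proofs are below) =====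
def Claim_equal_match_uri_py : Prop := ∀ (route_uri : String) (request_uri : String), Dom_match_uri_py route_uri request_uri → Spec_match_uri_py route_uri request_uri (match_uri_py route_uri request_uri)

-- ===== LEMMAS AND PROOFS =====

-- the segment list splitOn produces, phrased through segSplit
def segs (s : List Char) : List (List Char) :=
  match h : segSplit s with
  | (a, none) => [a]
  | (a, some t) => a :: segs t
termination_by s.length
decreasing_by exact segSplit_some_length h

theorem segs_none {s a : List Char} (h : segSplit s = (a, none)) : segs s = [a] := by
  rw [segs]
  split <;> rename_i a' h' <;> rw [h] at h' <;> simp_all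

theorem segs_some {s a t : List Char} (h : segSplit s = (a, some t)) :
    segs s = a :: segs t := by
  rw [segs]
  split <;> rename_i a' h' <;> rw [h] at h' <;> simp_all

theorem segSplit_nil : segSplit [] = ([], none) := rfl

theorem segSplit_cons_slash (rest : List Char) :
    segSplit ('/' :: rest) = ([], some rest) := rfl

def mapHead (f : List Char → List Char) : List (List Char) → List (List Char)
  | [] => []
  | a :: t => f a :: t

theorem segSplit_cons_ne {c : Char} (hc : (c != '/') = true) (rest : List Char) :
    segSplit (c :: rest) = (c :: (segSplit rest).1, (segSplit rest).2) := by
  unfold segSplit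
  simp only [List.dropWhile_cons, List.takeWhile_cons, hc, if_pos]
  split <;> simp_all

theorem segs_cons_ne {c : Char} (hc : (c != '/') = true) (rest : List Char) :
    segs (c :: rest) = mapHead (fun a => c :: a) (segs rest) := by
  rcases h : segSplit rest with ⟨a, _ | t⟩
  · rw [segs_none h, segs_none (by rw [segSplit_cons_ne hc, h])]; rfl
  · rw [segs_some h, segs_some (show segSplit (c :: rest) = (c :: a, some t) by rw [segSplit_cons_ne hc, h])]
    rfl

theorem segs_cons_slash (rest : List Char) : segs ('/' :: rest) = [] :: segs rest :=
  segs_some (segSplit_cons_slash rest)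

theorem segs_nil : segs [] = [[]] := segs_none segSplit_nil

theorem mapHead_mapHead (f g : List Char → List Char) (l : List (List Char)) :
    mapHead f (mapHead g l) = mapHead (fun a => f (g a)) l := by
  cases l <;> rfl

theorem mapHead_id (l : List (List Char)) : mapHead (fun a => a) l = l := by
  cases l <;> rfl

theorem splitOn_go_eq (fuel : Nat) :
    ∀ (l cur : List Char) (acc : List (List Char)), l.length < fuel →
      PySem.Chars.splitOn.go ['/'] fuel l cur acc
        = acc.reverse ++ mapHead (fun a => cur.reverse ++ a) (segs l) := by
  induction fuel with
  | zero => intro l cur acc h; omega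
  | succ f ih =>
    intro l cur acc h
    rcases l with _ | ⟨c, rest⟩
    · rw [PySem.Chars.splitOn.go]
      · simp [segs_nil, mapHead]
      · omega
    · rw [PySem.Chars.splitOn.go]
      by_cases hc : c = '/'
      · subst hc
        have hpre : ['/'].isPrefixOf ('/' :: rest) = true := by simp [List.isPrefixOf]
        rw [if_pos hpre]
        rw [ih _ _ _ (by simpa using h)]
        rw [segs_cons_slash]
        simp only [List.reverse_nil, List.nil_append]
        rw [mapHead_id]
        simp [mapHead]
      · have hc' : (c != '/') = true := by simpa using hc
        have hpre : ['/'].isPrefixOf (c :: rest) = false := by simp [List.isPrefixOf]; exact fun h => hc h.symm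
        rw [hpre]
        simp only [Bool.false_eq_true, if_false]
        rw [ih _ _ _ (by simpa using h)]
        rw [segs_cons_ne hc', mapHead_mapHead]
        simp [mapHead]

theorem splitOn_eq_segs (s : List Char) : PySem.Chars.splitOn s ['/'] = segs s := by
  have := splitOn_go_eq (s.length + 1) s [] [] (by omega)
  simpa [PySem.Chars.splitOn, mapHead_id] using this

theorem isPh_eq (r : List Char) :
    (PySem.Chars.startswith r ['{'] && PySem.Chars.endswith r ['}']) = isPh r := by
  unfold isPh
  congr 1
  · rcases r with _ | ⟨x, t⟩
    · rfl
    · simp [PySem.Chars.startswith, List.isPrefixOf]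
      exact eq_comm
  · have h1 : PySem.Chars.endswith r ['}'] = true ↔ ∃ ys, r = ys ++ ['}'] := by
      rw [PySem.Chars.endswith_iff]
      constructor
      · rintro ⟨t, ht⟩; exact ⟨t, ht.symm⟩
      · rintro ⟨ys, rfl⟩; exact ⟨ys, rfl⟩
    have h2 : (r.drop (r.length - 1) == ['}']) = true ↔ ∃ ys, r = ys ++ ['}'] := by
      rw [beq_iff_eq]
      constructor
      · intro hd
        refine ⟨r.take (r.length - 1), ?_⟩
        rw [← hd, List.take_append_drop]
      · rintro ⟨ys, rfl⟩
        simp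
    rcases h : PySem.Chars.endswith r ['}'] with _ | _
    · have hne : ¬ ∃ ys, r = ys ++ ['}'] := fun hx => by
        have := h1.mpr hx; rw [h] at this; exact Bool.false_ne_true this
      have := (not_iff_not.mpr h2).mpr hne
      exact (Bool.not_eq_true _).mp this |>.symm ▸ rfl
    · exact ((h2.mpr (h1.mp h))).symm ▸ rfl

theorem segs_ne_nil (s : List Char) : segs s ≠ [] := by
  rw [segs]; split <;> simp

theorem matchLoopA_cons (r q : List Char) (rest : List (List Char × List Char)) :
    matchLoopA ((r, q) :: rest) = ((isPh r || r == q) && matchLoopA rest) := by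
  rw [matchLoopA, isPh_eq]
  by_cases hp : isPh r = true
  · simp [hp]
  · simp only [Bool.not_eq_true] at hp
    by_cases hrq : r = q <;> simp [hp, hrq]

theorem goB_eq (rs qs : List Char) :
    goB rs qs = (if (segs rs).length ≠ (segs qs).length then false
                 else matchLoopA ((segs rs).zip (segs qs))) := by
  fun_induction goB with
  | case1 rs qs r q hr hq =>
    rw [segs_none hr, segs_none hq]
    simp [matchLoopA_cons, matchLoopA]
  | case2 rs qs r rs' q qs' hr hq ih =>
    rw [segs_some hr, segs_some hq]
    simp only [List.length_cons, List.zip_cons_cons, matchLoopA_cons, ne_eq,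
      Nat.add_right_cancel_iff]
    by_cases hl : (segs rs').length = (segs qs').length
    · simp [hl] at ih ⊢; rw [ih]
    · simp [hl] at ih ⊢
      intro _; exact ih
  | case3 rs qs x hx =>
    rcases hr : segSplit rs with ⟨r, _ | rs'⟩ <;> rcases hq : segSplit qs with ⟨q, _ | qs'⟩
    · exact absurd (x r q hr hq) not_false
    · rw [segs_none hr, segs_some hq]
      rw [if_pos (by simp; exact segs_ne_nil qs')]
    · rw [segs_some hr, segs_none hq]
      rw [if_pos (by simp; exact segs_ne_nil rs')]
    · exact absurd (hx r rs' q qs' hr hq) not_false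

theorem match_uri_py_eq (route_uri request_uri : String) :
    match_uri_py route_uri request_uri = match_uri_py_alt route_uri request_uri := by
  unfold match_uri_py match_uri_py_alt
  rw [splitOn_eq_segs, splitOn_eq_segs, goB_eq]

-- ===== VERDICT (by name: the statement is the Claim_ definition above) =====
theorem match_uri_py_spec : Claim_equal_match_uri_py := by
  intro r q _
  unfold Spec_match_uri_py
  exact match_uri_py_eq r q
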